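-- pv_equiv track=rewrite | github.com/paulklemstine/factor | v9_pyth_tree_theorems.py | generate_tree_modp
-- ===== SOURCE A (Python) =====
-- def berggren_matrices():
--     """Return the 3 Berggren matrices as lists-of-lists."""
--     A = [[ 1,-2, 2],[ 2,-1, 2],[ 2,-2, 3]]
--     B = [[ 1, 2, 2],[ 2, 1, 2],[ 2, 2, 3]]
--     C = [[-1, 2, 2],[-2, 1, 2],[-2, 2, 3]]
--     return [A, B, C]
--
-- def generate_tree_modp(depth, p):
--     """Generate tree mod p, tracking (a mod p, b mod p, c mod p)."""
--     mats = berggren_matrices()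
--     root = [3 % p, 4 % p, 5 % p]
--     results = [(root[0], root[1], root[2], '')]
--     queue = [(root, '')]
--     for d in range(depth):
--         new_queue = []
--         for triple, path in queue:
--             for i, M in enumerate(mats):
--                 child = [sum(M[r][j]*triple[j] for j in range(3)) % p for r in range(3)]
--                 results.append((child[0], child[1], child[2], path + 'ABC'[i]))
--                 new_queue.append((child, path + 'ABC'[i]))
--         queue = new_queue
--     return results
-- ===== SOURCE B (Python) =====
-- def generate_tree_modp(depth, p):
--     """Generate tree mod p by enumerating paths: node (L, k) is reached by the
--     path given by the L base-3 digits of k (most significant first), folding the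
--     Berggren matrices over the root vector.  No BFS queue is kept."""
--     mats = [
--         [[ 1, -2, 2], [ 2, -1, 2], [ 2, -2, 3]],
--         [[ 1,  2, 2], [ 2,  1, 2], [ 2,  2, 3]],
--         [[-1,  2, 2], [-2,  1, 2], [-2,  2, 3]],
--     ]
--     results = [(3 % p, 4 % p, 5 % p, '')]
--     for L in range(1, depth + 1):
--         for k in range(3 ** L):
--             # base-3 digits of k, most significant first
--             digits = []
--             kk = k
--             for _ in range(L):
--                 digits.append(kk % 3)
--                 kk //= 3
--             digits.reverse()
--             v = [3 % p, 4 % p, 5 % p]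
--             path = ''
--             for d in digits:
--                 M = mats[d]
--                 v = [(M[r][0] * v[0] + M[r][1] * v[1] + M[r][2] * v[2]) % p for r in range(3)]
--                 path += 'ABC'[d]
--             results.append((v[0], v[1], v[2], path))
--     return results
-- ===== Notes on version B (the rewrite author's own statement) =====
-- stated objective: alternative
-- what changed: Replaces the BFS queue of (triple, path) pairs by direct path enumeration: each node (level L, index k) is computed independently by folding the Berggren matrices named by the base-3 digits of k over the root vector, with no queue carried between levels; Pre_ only excludes p = 0, where the Python A raises ZeroDivisionError.
import Mathlib
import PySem

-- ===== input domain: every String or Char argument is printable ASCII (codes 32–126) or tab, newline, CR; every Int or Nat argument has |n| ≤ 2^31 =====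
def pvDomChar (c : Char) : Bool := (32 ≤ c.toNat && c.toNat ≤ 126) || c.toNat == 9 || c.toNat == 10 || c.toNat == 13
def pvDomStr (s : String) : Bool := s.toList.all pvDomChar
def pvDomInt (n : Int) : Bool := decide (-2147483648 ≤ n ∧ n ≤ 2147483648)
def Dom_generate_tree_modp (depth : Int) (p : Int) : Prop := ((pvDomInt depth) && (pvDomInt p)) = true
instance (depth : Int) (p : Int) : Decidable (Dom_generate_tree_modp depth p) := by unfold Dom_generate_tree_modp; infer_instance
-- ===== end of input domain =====

-- B replaces A's BFS queue of (triple, path) pairs by independent per-node computation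
-- from the base-3 digits of the node index (alternative decomposition, same output).
-- Pre_ excludes only p = 0, where the Python A raises ZeroDivisionError.


-- ===== PORT A =====
-- shared constants / tiny indexing primitives (used by both ports)
def pvMats : List (List (List Int)) :=
  [[[1, -2, 2], [2, -1, 2], [2, -2, 3]],
   [[1,  2, 2], [2,  1, 2], [2,  2, 3]],
   [[-1, 2, 2], [-2, 1, 2], [-2, 2, 3]]]
-- xs[i] for an index always in range (Python would raise IndexError outside; never hit here)
def pvIdx (xs : List Int) (i : Int) : Int := PySem.List.pyGetD xs i 0
def pvRow (M : List (List Int)) (r : Int) : List Int := PySem.List.pyGetD M r []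
-- 'ABC'[i], always in range here
def pvLetter (i : Int) : Char := (PySem.Str.pyGet? "ABC" i).getD ' '

-- A's child comprehension: [sum(M[r][j]*triple[j] for j in range(3)) % p for r in range(3)]
def pvChildA (M : List (List Int)) (t : List Int) (p : Int) : List Int :=
  (PySem.List.pyRange 0 3 1).map (fun r =>
    PySem.Int.mod ((PySem.List.pyRange 0 3 1).foldl
      (fun s j => s + pvIdx (pvRow M r) j * pvIdx t j) 0) p)

def generate_tree_modp (depth : Int) (p : Int) : List (Int × Int × Int × String) :=
  let mats := pvMats
  let root : List Int := [PySem.Int.mod 3 p, PySem.Int.mod 4 p, PySem.Int.mod 5 p]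
  let init : List (Int × Int × Int × String) := [(pvIdx root 0, pvIdx root 1, pvIdx root 2, "")]
  let final := (PySem.List.pyRange 0 depth 1).foldl
    (fun (st : List (Int × Int × Int × String) × List (List Int × String)) _ =>
      st.2.foldl
        (fun acc tp =>
          (PySem.List.enumerate mats).foldl
            (fun (acc2 : List (Int × Int × Int × String) × List (List Int × String)) iM =>
              let child := pvChildA iM.2 tp.1 p
              let np := tp.2.push (pvLetter iM.1)
              (acc2.1 ++ [(pvIdx child 0, pvIdx child 1, pvIdx child 2, np)],
               acc2.2 ++ [(child, np)]))
            acc)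
        (st.1, ([] : List (List Int × String))))
    (init, [(root, "")])
  final.1

-- ===== PORT B =====
def generate_tree_modp_alt (depth : Int) (p : Int) : List (Int × Int × Int × String) :=
  let mats := pvMats
  (PySem.List.pyRange 1 (depth + 1) 1).foldl
    (fun results L =>
      -- 3 ** L (exact: here 1 ≤ L, so L.toNat is L)
      (PySem.List.pyRange 0 ((3 : Int) ^ L.toNat) 1).foldl
        (fun results2 k =>
          -- base-3 digits of k, least significant first, then reversed
          let dk := (PySem.List.pyRange 0 L 1).foldl
            (fun (st : List Int × Int) _ =>
              (st.1 ++ [PySem.Int.mod st.2 3], PySem.Int.floordiv st.2 3))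
            ([], k)
          let digits := dk.1.reverse
          let vp := digits.foldl
            (fun (st : List Int × String) d =>
              let M := PySem.List.pyGetD mats d []
              ((PySem.List.pyRange 0 3 1).map (fun r =>
                 PySem.Int.mod (pvIdx (pvRow M r) 0 * pvIdx st.1 0 +
                                pvIdx (pvRow M r) 1 * pvIdx st.1 1 +
                                pvIdx (pvRow M r) 2 * pvIdx st.1 2) p),
               st.2.push (pvLetter d)))
            ([PySem.Int.mod 3 p, PySem.Int.mod 4 p, PySem.Int.mod 5 p], "")
          results2 ++ [(pvIdx vp.1 0, pvIdx vp.1 1, pvIdx vp.1 2, vp.2)])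
        results)
    [(PySem.Int.mod 3 p, PySem.Int.mod 4 p, PySem.Int.mod 5 p, "")]

-- ===== PRECONDITION & SPEC =====
-- p = 0 is excluded: there the Python A (and B) raise ZeroDivisionError on '3 % p'.
def Pre_generate_tree_modp (depth : Int) (p : Int) : Prop := p ≠ 0
instance (depth : Int) (p : Int) : Decidable (Pre_generate_tree_modp depth p) := by
  unfold Pre_generate_tree_modp; infer_instance
def pvWitness_generate_tree_modp : Int × Int := (2, 5)

def Spec_generate_tree_modp (depth : Int) (p : Int) (out : List (Int × Int × Int × String)) : Prop := out = generate_tree_modp_alt depth p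
instance (depth : Int) (p : Int) (out : List (Int × Int × Int × String)) : Decidable (Spec_generate_tree_modp depth p out) := by unfold Spec_generate_tree_modp; infer_instance

-- ===== CLAIM (what is proved, stated in full; the proofs are below) =====
def Claim_equal_generate_tree_modp : Prop := ∀ (depth : Int) (p : Int), Dom_generate_tree_modp depth p → Pre_generate_tree_modp depth p → Spec_generate_tree_modp depth p (generate_tree_modp depth p)

-- ===== LEMMAS AND PROOFS =====

-- ----- shared reference layer: nodes indexed by their base-3 digit path -----
def pvMatOf (d : Nat) : List (List Int) := PySem.List.pyGetD pvMats (d : Int) []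
def pvRootV (p : Int) : List Int := [PySem.Int.mod 3 p, PySem.Int.mod 4 p, PySem.Int.mod 5 p]
def pvStep (p : Int) (st : List Int × String) (d : Nat) : List Int × String :=
  (pvChildA (pvMatOf d) st.1 p, st.2.push (pvLetter (d : Int)))
def pvNode (p : Int) (ds : List Nat) : List Int × String := ds.foldl (pvStep p) (pvRootV p, "")
def pvToE (tp : List Int × String) : Int × Int × Int × String :=
  (pvIdx tp.1 0, pvIdx tp.1 1, pvIdx tp.1 2, tp.2)
def pvEntry (p : Int) (ds : List Nat) : Int × Int × Int × String := pvToE (pvNode p ds)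
def pvExpand (p : Int) (tp : List Int × String) : List (List Int × String) :=
  [pvStep p tp 0, pvStep p tp 1, pvStep p tp 2]
def pvDigitsAll : Nat → List (List Nat)
  | 0 => [[]]
  | n + 1 => (pvDigitsAll n).flatMap (fun ds => [ds ++ [0], ds ++ [1], ds ++ [2]])
def pvRes (p : Int) (n : Nat) : List (Int × Int × Int × String) :=
  pvEntry p [] :: (List.range n).flatMap (fun t => (pvDigitsAll (t + 1)).map (pvEntry p))

-- ----- A side -----
def pvInnerA (p : Int)
    (acc : List (Int × Int × Int × String) × List (List Int × String))
    (tp : List Int × String) : List (Int × Int × Int × String) × List (List Int × String) :=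
  (PySem.List.enumerate pvMats).foldl
    (fun (acc2 : List (Int × Int × Int × String) × List (List Int × String)) iM =>
      let child := pvChildA iM.2 tp.1 p
      let np := tp.2.push (pvLetter iM.1)
      (acc2.1 ++ [(pvIdx child 0, pvIdx child 1, pvIdx child 2, np)],
       acc2.2 ++ [(child, np)]))
    acc
def pvLevelA (p : Int)
    (st : List (Int × Int × Int × String) × List (List Int × String)) :
    List (Int × Int × Int × String) × List (List Int × String) :=
  st.2.foldl (pvInnerA p) (st.1, [])

lemma pvA_eq (depth p : Int) :
    generate_tree_modp depth p =
      ((PySem.List.pyRange 0 depth 1).foldl (fun st _ => pvLevelA p st)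
        ([(pvIdx (pvRootV p) 0, pvIdx (pvRootV p) 1, pvIdx (pvRootV p) 2, "")],
         [(pvRootV p, "")])).1 := rfl

lemma pvNode_append (p : Int) (ds : List Nat) (d : Nat) :
    pvNode p (ds ++ [d]) = pvStep p (pvNode p ds) d := by
  simp [pvNode, List.foldl_append]

lemma pvExpand_node (p : Int) (ds : List Nat) :
    pvExpand p (pvNode p ds) = [pvNode p (ds ++ [0]), pvNode p (ds ++ [1]), pvNode p (ds ++ [2])] := by
  simp [pvExpand, pvNode_append]

lemma pvInnerA_one (p : Int) (acc : List (Int × Int × Int × String) × List (List Int × String))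
    (tp : List Int × String) :
    pvInnerA p acc tp = (acc.1 ++ (pvExpand p tp).map pvToE, acc.2 ++ pvExpand p tp) := by
  have he : PySem.List.enumerate pvMats = [((0 : Int), pvMatOf 0), (1, pvMatOf 1), (2, pvMatOf 2)] := by
    decide
  simp only [pvInnerA, he, List.foldl_cons, List.foldl_nil]
  simp [pvExpand, pvStep, pvToE, List.append_assoc]

lemma pvFoldlInnerA (p : Int) :
    ∀ (q : List (List Int × String)) (res : List (Int × Int × Int × String))
      (nq : List (List Int × String)),
      q.foldl (pvInnerA p) (res, nq) =
        (res ++ q.flatMap (fun tp => (pvExpand p tp).map pvToE), nq ++ q.flatMap (pvExpand p))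
  | [], res, nq => by simp
  | tp :: q, res, nq => by
    rw [List.foldl_cons, pvInnerA_one, pvFoldlInnerA p q]
    simp [List.append_assoc]

lemma pvDigitsAll_succ_map {γ : Type} (f : List Nat → γ) (n : Nat) :
    (pvDigitsAll (n + 1)).map f =
      (pvDigitsAll n).flatMap (fun ds => [f (ds ++ [0]), f (ds ++ [1]), f (ds ++ [2])]) := by
  simp [pvDigitsAll, List.map_flatMap]

lemma pvIterA (p : Int) :
    ∀ n : Nat, (fun st => pvLevelA p st)^[n] ([pvEntry p []], [(pvRootV p, "")]) =
      (pvRes p n, (pvDigitsAll n).map (pvNode p))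
  | 0 => by simp [pvRes, pvDigitsAll, pvNode]
  | n + 1 => by
    rw [Function.iterate_succ_apply', pvIterA p n]
    show pvLevelA p _ = _
    rw [pvLevelA, pvFoldlInnerA]
    dsimp only
    rw [Prod.mk.injEq]
    refine ⟨?_, ?_⟩
    · rw [List.flatMap_map]
      have hpt : (fun ds => (pvExpand p (pvNode p ds)).map pvToE) =
          fun ds => [pvEntry p (ds ++ [0]), pvEntry p (ds ++ [1]), pvEntry p (ds ++ [2])] := by
        funext ds; simp [pvExpand_node, pvEntry]
      rw [hpt, ← pvDigitsAll_succ_map (pvEntry p) n]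
      simp [pvRes, List.range_succ]
    · rw [List.flatMap_map]
      have hpt : (fun ds => pvExpand p (pvNode p ds)) =
          fun ds => [pvNode p (ds ++ [0]), pvNode p (ds ++ [1]), pvNode p (ds ++ [2])] := by
        funext ds; simp [pvExpand_node]
      rw [hpt, ← pvDigitsAll_succ_map (pvNode p) n]
      simp

lemma pvA_final (depth p : Int) : generate_tree_modp depth p = pvRes p depth.toNat := by
  rw [pvA_eq, List.foldl_const]
  have hinit : ([(pvIdx (pvRootV p) 0, pvIdx (pvRootV p) 1, pvIdx (pvRootV p) 2, "")],
      ([(pvRootV p, "")] : List (List Int × String))) = ([pvEntry p []], [(pvRootV p, "")]) := rfl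
  have hlen : (PySem.List.pyRange 0 depth 1).length = depth.toNat := by
    simp [PySem.List.length_pyRange_one]
  rw [hinit, hlen, pvIterA p depth.toNat]

-- ----- B side -----
def pvEB (p : Int) (L : Int) (k : Int) : Int × Int × Int × String :=
  let dk := (PySem.List.pyRange 0 L 1).foldl
    (fun (st : List Int × Int) _ =>
      (st.1 ++ [PySem.Int.mod st.2 3], PySem.Int.floordiv st.2 3))
    ([], k)
  let digits := dk.1.reverse
  let vp := digits.foldl
    (fun (st : List Int × String) d =>
      let M := PySem.List.pyGetD pvMats d []
      ((PySem.List.pyRange 0 3 1).map (fun r =>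
         PySem.Int.mod (pvIdx (pvRow M r) 0 * pvIdx st.1 0 +
                        pvIdx (pvRow M r) 1 * pvIdx st.1 1 +
                        pvIdx (pvRow M r) 2 * pvIdx st.1 2) p),
       st.2.push (pvLetter d)))
    ([PySem.Int.mod 3 p, PySem.Int.mod 4 p, PySem.Int.mod 5 p], "")
  (pvIdx vp.1 0, pvIdx vp.1 1, pvIdx vp.1 2, vp.2)

lemma pvB_eq (depth p : Int) :
    generate_tree_modp_alt depth p =
      (PySem.List.pyRange 1 (depth + 1) 1).foldl
        (fun results L =>
          (PySem.List.pyRange 0 ((3 : Int) ^ L.toNat) 1).foldl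
            (fun results2 k => results2 ++ [pvEB p L k]) results)
        [(PySem.Int.mod 3 p, PySem.Int.mod 4 p, PySem.Int.mod 5 p, "")] := rfl

-- base-3 digits of k, least significant first / most significant first
def pvLsbN : Nat → Nat → List Nat
  | 0, _ => []
  | n + 1, k => (k % 3) :: pvLsbN n (k / 3)
def pvDigs (n k : Nat) : List Nat := (pvLsbN n k).reverse

def pvDecStep (st : List Int × Int) : List Int × Int :=
  (st.1 ++ [PySem.Int.mod st.2 3], PySem.Int.floordiv st.2 3)

lemma pvDec_iter :
    ∀ (n : Nat) (ds : List Int) (m : Nat),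
      pvDecStep^[n] (ds, (m : Int)) =
        (ds ++ (pvLsbN n m).map (fun x : Nat => (x : Int)), ((m / 3 ^ n : Nat) : Int))
  | 0, ds, m => by simp [pvLsbN]
  | n + 1, ds, m => by
    rw [Function.iterate_succ_apply]
    have h1 : pvDecStep (ds, (m : Int)) = (ds ++ [((m % 3 : Nat) : Int)], ((m / 3 : Nat) : Int)) := by
      have hm : PySem.Int.mod ((m : Nat) : Int) 3 = ((m % 3 : Nat) : Int) := by
        exact_mod_cast PySem.Int.mod_natCast m 3
      have hd : PySem.Int.floordiv ((m : Nat) : Int) 3 = ((m / 3 : Nat) : Int) := by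
        exact_mod_cast PySem.Int.floordiv_natCast m 3
      simp only [pvDecStep]
      rw [hm, hd]
    rw [h1, pvDec_iter n]
    have : m / 3 / 3 ^ n = m / 3 ^ (n + 1) := by
      rw [Nat.div_div_eq_div_mul, pow_succ']
    simp [pvLsbN, this, List.append_assoc]

-- B's per-step child expression computes A's child comprehension (for any v, M)
lemma pvChildAB (M : List (List Int)) (v : List Int) (p : Int) :
    ((PySem.List.pyRange 0 3 1).map (fun r =>
       PySem.Int.mod (pvIdx (pvRow M r) 0 * pvIdx v 0 +
                      pvIdx (pvRow M r) 1 * pvIdx v 1 +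
                      pvIdx (pvRow M r) 2 * pvIdx v 2) p)) = pvChildA M v p := by
  have h3 : PySem.List.pyRange 0 3 1 = [0, 1, 2] := by decide
  simp [pvChildA, h3]

lemma pvFoldB (p : Int) :
    ∀ (dsN : List Nat) (st : List Int × String),
      List.foldl
        (fun (st : List Int × String) d =>
          let M := PySem.List.pyGetD pvMats d []
          ((PySem.List.pyRange 0 3 1).map (fun r =>
             PySem.Int.mod (pvIdx (pvRow M r) 0 * pvIdx st.1 0 +
                            pvIdx (pvRow M r) 1 * pvIdx st.1 1 +
                            pvIdx (pvRow M r) 2 * pvIdx st.1 2) p),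
           st.2.push (pvLetter d)))
        st (dsN.map (fun x : Nat => (x : Int))) = dsN.foldl (pvStep p) st
  | [], st => rfl
  | d :: dsN, st => by
    rw [List.map_cons, List.foldl_cons, List.foldl_cons, pvFoldB p dsN]
    have h : (let M := PySem.List.pyGetD pvMats (d : Int) []
        ((PySem.List.pyRange 0 3 1).map (fun r =>
           PySem.Int.mod (pvIdx (pvRow M r) 0 * pvIdx st.1 0 +
                          pvIdx (pvRow M r) 1 * pvIdx st.1 1 +
                          pvIdx (pvRow M r) 2 * pvIdx st.1 2) p),
         st.2.push (pvLetter (d : Int)))) = pvStep p st d := by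
      show _ = pvStep p st d
      rw [pvStep, pvMatOf, ← pvChildAB]
    rw [h]

lemma pvEB_entry (p : Int) (t k : Nat) :
    pvEB p (1 + (t : Int)) ((k : Int)) = pvEntry p (pvDigs (t + 1) k) := by
  have hconst : (fun (st : List Int × Int) (_ : Int) =>
      (st.1 ++ [PySem.Int.mod st.2 3], PySem.Int.floordiv st.2 3)) =
      (fun st _ => pvDecStep st) := rfl
  have hlen : (PySem.List.pyRange 0 (1 + (t : Int)) 1).length = t + 1 := by
    simp [PySem.List.length_pyRange_one]; omega
  have hrev : (((pvLsbN (t + 1) k).map (fun x : Nat => (x : Int)))).reverse =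
      ((pvLsbN (t + 1) k).reverse).map (fun x : Nat => (x : Int)) := by
    rw [← List.map_reverse]
  rw [pvEB, hconst, List.foldl_const, hlen, pvDec_iter (t + 1) [] k, List.nil_append,
      hrev, pvFoldB p]
  rfl

lemma pvRange_mul3 {γ : Type} (f : Nat → γ) :
    ∀ m : Nat, (List.range (3 * m)).map f =
      (List.range m).flatMap (fun q => [f (3 * q), f (3 * q + 1), f (3 * q + 2)])
  | 0 => by simp
  | m + 1 => by
    have h : 3 * (m + 1) = (3 * m + 1 + 1) + 1 := by ring
    rw [h, List.range_succ, List.range_succ, List.range_succ, List.range_succ]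
    simp [pvRange_mul3 f m, List.append_assoc]

lemma pvDigs_succ (L q r : Nat) (hr : r < 3) :
    pvDigs (L + 1) (3 * q + r) = pvDigs L q ++ [r] := by
  have h1 : (3 * q + r) % 3 = r := by omega
  have h2 : (3 * q + r) / 3 = q := by omega
  simp [pvDigs, pvLsbN, h1, h2]

lemma pvDigs_range : ∀ L : Nat, (List.range (3 ^ L)).map (pvDigs L) = pvDigitsAll L
  | 0 => by simp [pvDigs, pvLsbN, pvDigitsAll]
  | L + 1 => by
    have h : (3 : Nat) ^ (L + 1) = 3 * 3 ^ L := by rw [pow_succ, mul_comm]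
    rw [h, pvRange_mul3]
    have hpt : (fun q => [pvDigs (L + 1) (3 * q), pvDigs (L + 1) (3 * q + 1), pvDigs (L + 1) (3 * q + 2)]) =
        fun q => [pvDigs L q ++ [0], pvDigs L q ++ [1], pvDigs L q ++ [2]] := by
      funext q
      rw [show 3 * q = 3 * q + 0 from rfl] 
      rw [pvDigs_succ L q 0 (by omega), pvDigs_succ L q 1 (by omega), pvDigs_succ L q 2 (by omega)]
    rw [hpt, show pvDigitsAll (L + 1) = (pvDigitsAll L).flatMap (fun ds => [ds ++ [0], ds ++ [1], ds ++ [2]]) from rfl,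
        ← pvDigs_range L, List.flatMap_map]

lemma pvLevel_B (p : Int) (t : Nat) :
    (PySem.List.pyRange 0 ((3 : Int) ^ (1 + (t : Int)).toNat) 1).map (pvEB p (1 + (t : Int))) =
      (pvDigitsAll (t + 1)).map (pvEntry p) := by
  have h1 : (1 + (t : Int)).toNat = t + 1 := by omega
  rw [h1, PySem.List.pyRange_one]
  have h2 : (((3 : Int) ^ (t + 1)) - 0).toNat = 3 ^ (t + 1) := by
    have h3 : ((3 : Int) ^ (t + 1)) = ((3 ^ (t + 1) : Nat) : Int) := by push_cast; ring
    rw [sub_zero, h3, Int.toNat_natCast]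
  rw [h2, List.map_map]
  have hpt : ((pvEB p (1 + (t : Int))) ∘ fun (k : Nat) => (0 : Int) + (k : Int)) =
      fun k => pvEntry p (pvDigs (t + 1) k) := by
    funext k
    simp [Function.comp, pvEB_entry]
  rw [hpt, show (fun k => pvEntry p (pvDigs (t + 1) k)) = (pvEntry p) ∘ (pvDigs (t + 1)) from rfl,
      ← List.map_map, pvDigs_range]

lemma pvB_final (depth p : Int) : generate_tree_modp_alt depth p = pvRes p depth.toNat := by
  rw [pvB_eq]
  simp only [PySem.List.foldl_append_singleton_eq_map, PySem.List.foldl_append_eq_flatMap]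
  rw [PySem.List.pyRange_one 1 (depth + 1), show depth + 1 - 1 = depth from by ring, List.flatMap_map]
  simp only [pvLevel_B p]
  have hroot : (PySem.Int.mod 3 p, PySem.Int.mod 4 p, PySem.Int.mod 5 p, ("" : String)) = pvEntry p [] := rfl
  rw [hroot, pvRes]
  rfl

-- ===== VERDICT (by name: the statement is the Claim_ definition above) =====
theorem generate_tree_modp_spec : Claim_equal_generate_tree_modp := by
  intro depth p _ _
  unfold Spec_generate_tree_modp
  rw [pvA_final, pvB_final]
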